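-- pv_equiv track=rewrite | github.com/AgusQuintanar/TEC | FIRST SEMESTER/PROGRAMMING FUNDAMENTS/Final_Fundamenrtos/limpiar_nombres_archivos_siil.py | convertir_string_a_lista
-- ===== SOURCE A (Python) =====
-- def convertir_string_a_lista(ls_clientes):
--     a = ls_clientes
--     a = a.split('\t')
--     clientes = []
--     for x in range(len(a)):
--         b = a[x].strip('\n')
--         c = b.split('\n')
--         for y in range(len(c)):
--             if c[y] != '' and c[y].count('.') == 0: #Elimina los archivos que no sean carpetas (Directorios)
--                 clientes.append(c[y])
--     return clientes
-- ===== SOURCE B (Python) =====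
-- def convertir_string_a_lista(ls_clientes):
--     # Single left-to-right character scan with a token accumulator instead of
--     # nested split passes: flush the current token at every tab/newline.
--     clientes = []
--     tok = ''
--     for ch in ls_clientes + '\t':
--         if ch == '\t' or ch == '\n':
--             if tok != '' and '.' not in tok:
--                 clientes.append(tok)
--             tok = ''
--         else:
--             tok += ch
--     return clientes
-- ===== Notes on version B (the rewrite author's own statement) =====
-- stated objective: simpler
-- what changed: Replaced A's nested split-on-tab / strip / split-on-newline passes with a single left-to-right character scan that accumulates a token and flushes it at every tab or newline.
import Mathlib
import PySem

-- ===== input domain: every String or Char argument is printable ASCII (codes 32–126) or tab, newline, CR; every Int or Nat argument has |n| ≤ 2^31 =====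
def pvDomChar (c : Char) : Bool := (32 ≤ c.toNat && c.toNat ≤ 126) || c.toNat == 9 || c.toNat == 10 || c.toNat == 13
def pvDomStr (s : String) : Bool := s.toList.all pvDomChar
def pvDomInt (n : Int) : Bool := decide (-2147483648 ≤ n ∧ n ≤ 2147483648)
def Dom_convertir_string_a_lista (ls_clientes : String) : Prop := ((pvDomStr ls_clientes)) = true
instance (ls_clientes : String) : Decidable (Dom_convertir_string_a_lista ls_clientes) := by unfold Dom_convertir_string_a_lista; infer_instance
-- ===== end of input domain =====

-- B replaces A's nested tab-then-newline split loops by one flat character scan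
-- with a token accumulator (objective: simpler — one pass, no nested loops).

-- ===== PORT A =====
def convertir_string_a_lista (ls_clientes : String) : List String :=
  -- a = ls_clientes.split('\t'); sep "\t" is nonempty so split? is always `some`
  let a := (PySem.Str.split? ls_clientes "\t").getD []
  (PySem.List.pyRange 0 (a.length : Int) 1).foldl
    (fun clientes x =>
      let b := PySem.Str.stripChars (PySem.List.pyGetD a x "") "\n"
      let c := (PySem.Str.split? b "\n").getD []
      (PySem.List.pyRange 0 (c.length : Int) 1).foldl
        (fun clientes y =>
          let cy := PySem.List.pyGetD c y ""
          if cy ≠ "" ∧ PySem.Str.count cy "." = 0 then clientes ++ [cy] else clientes)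
        clientes)
    []

-- ===== PORT B =====
def convertir_string_a_lista_alt (ls_clientes : String) : List String :=
  -- for ch in ls_clientes + '\t': string iteration/concatenation is exact on toList;
  -- `ch in '\t\n'` for a single char is the disjunction; `'.' not in tok` is char membership.
  ((ls_clientes.toList ++ ['\t']).foldl
    (fun (st : List String × List Char) ch =>
      if ch = '\t' ∨ ch = '\n' then
        (if st.2 ≠ [] ∧ '.' ∉ st.2 then st.1 ++ [String.ofList st.2] else st.1, ([] : List Char))
      else (st.1, st.2 ++ [ch]))
    ([], [])).1

-- ===== PRECONDITION & SPEC =====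
def Spec_convertir_string_a_lista (ls_clientes : String) (out : List String) : Prop := out = convertir_string_a_lista_alt ls_clientes
instance (ls_clientes : String) (out : List String) : Decidable (Spec_convertir_string_a_lista ls_clientes out) := by unfold Spec_convertir_string_a_lista; infer_instance

-- ===== CLAIM (what is proved, stated in full; the proofs are below) =====
def Claim_equal_convertir_string_a_lista : Prop := ∀ (ls_clientes : String), Dom_convertir_string_a_lista ls_clientes → Spec_convertir_string_a_lista ls_clientes (convertir_string_a_lista ls_clientes)

-- ===== LEMMAS AND PROOFS =====

-- the keep-filter both programs apply to a token
def pvKeep (t : List Char) : Bool := !t.isEmpty && !t.contains '.'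

-- recursive characterisation of a single-character split
def pvSplit1 (d : Char) : List Char → List (List Char)
  | [] => [[]]
  | c :: cs => if c = d then [] :: pvSplit1 d cs else (pvSplit1 d cs).modifyHead (c :: ·)

def pvFlush (t : List Char) : List (List Char) := if t ≠ [] ∧ '.' ∉ t then [t] else []

-- the one-pass scanner B performs, as a structural recursion
def pvCollect : List Char → List Char → List (List Char)
  | [], tok => pvFlush tok
  | c :: cs, tok => if c = '\t' ∨ c = '\n' then pvFlush tok ++ pvCollect cs [] else pvCollect cs (tok ++ [c])

theorem pvSplit1_ne_nil (d : Char) (l : List Char) : pvSplit1 d l ≠ [] := by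
  cases l with
  | nil => simp [pvSplit1]
  | cons c cs =>
    simp only [pvSplit1]
    split_ifs
    · simp
    · cases h : pvSplit1 d cs with
      | nil => exact absurd h (pvSplit1_ne_nil d cs)
      | cons a t => simp [h]

theorem pvModifyHead_id' {α : Type} (l : List α) : List.modifyHead (fun x => x) l = l :=
  congrFun List.modifyHead_id l

theorem pvSplitOn_go (d : Char) (fuel : Nat) (l cur : List Char) (acc : List (List Char))
    (h : l.length < fuel) :
    PySem.Chars.splitOn.go [d] fuel l cur acc
      = acc.reverse ++ (pvSplit1 d l).modifyHead (cur.reverse ++ ·) := by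
  induction fuel generalizing l cur acc with
  | zero => omega
  | succ fuel ih =>
    cases l with
    | nil => simp [PySem.Chars.splitOn.go, pvSplit1]
    | cons c cs =>
      simp only [PySem.Chars.splitOn.go, List.isPrefixOf, List.isPrefixOf_nil_left]
      by_cases hc : c = d
      · subst hc
        simp only [beq_self_eq_true, Bool.true_and, if_pos, and_true]
        rw [ih _ _ _ (by simpa using h)]
        simp only [pvSplit1, if_pos rfl, List.drop_one, List.tail_cons, List.reverse_nil,
          List.modifyHead_cons]
        simp [pvModifyHead_id']
      · have : (d == c && true) = false := by
          simp only [Bool.and_true, beq_eq_false_iff_ne, ne_eq]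
          exact fun h' => hc h'.symm
        rw [if_neg (by simp [this])]
        rw [ih _ _ _ (by simpa using Nat.lt_of_succ_lt_succ h)]
        simp only [pvSplit1, if_neg hc]
        rw [List.modifyHead_modifyHead]
        have hfg : (fun x => (c :: cur).reverse ++ x)
            = ((fun x => cur.reverse ++ x) ∘ fun x => c :: x) := by
          funext x; simp
        rw [hfg]

theorem pvSplitOn_single (d : Char) (l : List Char) :
    PySem.Chars.splitOn l [d] = pvSplit1 d l := by
  unfold PySem.Chars.splitOn
  rw [pvSplitOn_go d _ l [] [] (by omega)]
  simp [pvModifyHead_id']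

theorem pvCount_go (c0 : Char) (fuel : Nat) (l : List Char) (acc : Nat)
    (h : l.length ≤ fuel) :
    PySem.Chars.count.go [c0] fuel l acc = acc + l.count c0 := by
  induction fuel generalizing l acc with
  | zero =>
    cases l with
    | nil => simp [PySem.Chars.count.go]
    | cons c cs => simp at h
  | succ fuel ih =>
    cases l with
    | nil => simp [PySem.Chars.count.go]
    | cons c cs =>
      simp only [PySem.Chars.count.go, List.isPrefixOf, List.isPrefixOf_nil_left, and_true]
      by_cases hc : c0 = c
      · subst hc
        rw [if_pos (by simp)]
        rw [ih _ _ (by simpa using h)]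
        simp [List.count_cons, List.drop_one]
        omega
      · rw [if_neg (by simpa using hc)]
        rw [ih _ _ (by simpa using Nat.le_of_succ_le_succ (by simpa using h))]
        simp [List.count_cons, beq_iff_eq, Ne.symm hc]

theorem pvCount_single (l : List Char) (c0 : Char) :
    PySem.Chars.count l [c0] = l.count c0 := by
  unfold PySem.Chars.count
  simp [PySem.Chars.count.go, pvCount_go c0 l.length l 0 le_rfl]


theorem pvKeep_nil : pvKeep [] = false := by simp [pvKeep]

theorem pvKeep_iff (t : List Char) : pvKeep t = true ↔ (t ≠ [] ∧ '.' ∉ t) := by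
  simp [pvKeep, List.isEmpty_iff, List.contains_eq_mem]

theorem pvFlush_eq (t : List Char) : pvFlush t = if pvKeep t = true then [t] else [] := by
  unfold pvFlush
  by_cases h : t ≠ [] ∧ '.' ∉ t
  · rw [if_pos h, if_pos ((pvKeep_iff t).2 h)]
  · rw [if_neg h, if_neg (fun hk => h ((pvKeep_iff t).1 hk))]

theorem pvFilter_cons_eq_flush (t : List Char) (S : List (List Char)) :
    (t :: S).filter pvKeep = pvFlush t ++ S.filter pvKeep := by
  rw [List.filter_cons, pvFlush_eq]
  split_ifs <;> simp

theorem pvSplit1_cons_delim (d : Char) (cs : List Char) :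
    pvSplit1 d (d :: cs) = [] :: pvSplit1 d cs := by simp [pvSplit1]

theorem pvSplit1_cons_ne {c d : Char} (cs : List Char) (hc : ¬ c = d) :
    pvSplit1 d (c :: cs) = (pvSplit1 d cs).modifyHead (c :: ·) := by simp [pvSplit1, hc]

theorem pvCollect_cons_delim {c : Char} (cs tok : List Char) (h : c = '\t' ∨ c = '\n') :
    pvCollect (c :: cs) tok = pvFlush tok ++ pvCollect cs [] := by simp [pvCollect, h]

theorem pvCollect_cons_ne {c : Char} (cs tok : List Char) (h : ¬ (c = '\t' ∨ c = '\n')) :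
    pvCollect (c :: cs) tok = pvCollect cs (tok ++ [c]) := by simp [pvCollect, h]

theorem pvSplit1_no_delim (d : Char) (l : List Char) (h : d ∉ l) : pvSplit1 d l = [l] := by
  induction l with
  | nil => rfl
  | cons c cs ih =>
    have hc : ¬ c = d := fun he => h (by simp [he])
    simp only [pvSplit1, if_neg hc, ih (fun hm => h (List.mem_cons_of_mem _ hm))]
    rfl

theorem pvSplit1_append_notmem (d : Char) (tok u : List Char) (h : d ∉ tok) :
    pvSplit1 d (tok ++ u) = (pvSplit1 d u).modifyHead (tok ++ ·) := by
  induction tok with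
  | nil => simp [pvModifyHead_id']
  | cons c tok ih =>
    have hc : ¬ c = d := fun he => h (by simp [he])
    simp only [List.cons_append, pvSplit1, if_neg hc,
      ih (fun hm => h (List.mem_cons_of_mem _ hm)), List.modifyHead_modifyHead]
    congr 1

theorem pvSplit1_append_delim (d : Char) (cs : List Char) :
    pvSplit1 d (cs ++ [d]) = pvSplit1 d cs ++ [[]] := by
  induction cs with
  | nil => simp [pvSplit1]
  | cons c cs ih =>
    by_cases hc : c = d
    · subst hc; simp [pvSplit1, ih]
    · obtain ⟨a, t, hat⟩ := List.exists_cons_of_ne_nil (pvSplit1_ne_nil d cs)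
      simp [pvSplit1, if_neg hc, ih, hat]

theorem pvLstrip_filter (l : List Char) :
    (pvSplit1 '\n' (l.dropWhile (['\n'].contains ·))).filter pvKeep
      = (pvSplit1 '\n' l).filter pvKeep := by
  induction l with
  | nil => rfl
  | cons c cs ih =>
    by_cases hc : c = '\n'
    · subst hc
      rw [List.dropWhile_cons_of_pos (by simp)]
      rw [ih, pvSplit1_cons_delim, List.filter_cons]
      simp [pvKeep_nil]
    · rw [List.dropWhile_cons_of_neg (by simp [hc])]

theorem pvRstrip_filter (l : List Char) :
    (pvSplit1 '\n' (l.reverse.dropWhile (['\n'].contains ·)).reverse).filter pvKeep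
      = (pvSplit1 '\n' l).filter pvKeep := by
  induction l using List.reverseRecOn with
  | nil => rfl
  | append_singleton xs a ih =>
    by_cases ha : a = '\n'
    · subst ha
      rw [List.reverse_append, List.reverse_singleton, List.singleton_append,
        List.dropWhile_cons_of_pos (by simp)]
      rw [ih, pvSplit1_append_delim, List.filter_append]
      simp [List.filter_cons, pvKeep_nil]
    · rw [List.reverse_append, List.reverse_singleton, List.singleton_append,
        List.dropWhile_cons_of_neg (by simp [ha])]
      simp

theorem pvStrip_filter (l : List Char) :
    (pvSplit1 '\n' (PySem.Chars.stripChars l ['\n'])).filter pvKeep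
      = (pvSplit1 '\n' l).filter pvKeep := by
  show (pvSplit1 '\n' ((l.dropWhile (['\n'].contains ·)).reverse.dropWhile
        (['\n'].contains ·)).reverse).filter pvKeep = _
  rw [pvRstrip_filter, pvLstrip_filter]

-- A's flat-mapped two-level split equals B's one-pass scan (token accumulator generalised)
theorem pvMain (cs : List Char) (tok : List Char) (hn : '\n' ∉ tok) (ht : '\t' ∉ tok) :
    ((pvSplit1 '\t' cs).modifyHead (tok ++ ·)).flatMap
        (fun p => (pvSplit1 '\n' p).filter pvKeep)
      = pvCollect cs tok := by
  induction cs generalizing tok with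
  | nil =>
    show ((([[]] : List (List Char))).modifyHead (tok ++ ·)).flatMap _ = pvFlush tok
    simp only [List.modifyHead_cons, List.append_nil, List.flatMap_cons, List.flatMap_nil,
      List.append_nil]
    rw [pvSplit1_no_delim _ _ hn, pvFilter_cons_eq_flush]
    simp
  | cons c cs ih =>
    have h0 : (pvSplit1 '\t' cs).flatMap (fun p => (pvSplit1 '\n' p).filter pvKeep)
        = pvCollect cs [] := by
      have := ih [] (by simp) (by simp)
      simpa [pvModifyHead_id'] using this
    by_cases hct : c = '\t'
    · subst hct
      rw [pvSplit1_cons_delim, pvCollect_cons_delim cs tok (Or.inl rfl)]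
      simp only [List.modifyHead_cons, List.append_nil, List.flatMap_cons]
      rw [pvSplit1_no_delim _ _ hn, pvFilter_cons_eq_flush, h0]
      simp
    · obtain ⟨a, t, hat⟩ := List.exists_cons_of_ne_nil (pvSplit1_ne_nil '\t' cs)
      by_cases hcn : c = '\n'
      · subst hcn
        rw [pvSplit1_cons_ne cs hct, pvCollect_cons_delim cs tok (Or.inr rfl),
          List.modifyHead_modifyHead, hat]
        simp only [List.modifyHead_cons, Function.comp, List.flatMap_cons]
        rw [show tok ++ '\n' :: a = tok ++ ('\n' :: a) from rfl,
          pvSplit1_append_notmem '\n' tok _ hn, pvSplit1_cons_delim]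
        simp only [List.modifyHead_cons, List.append_nil]
        rw [pvFilter_cons_eq_flush, ← h0, hat]
        simp
      · rw [pvSplit1_cons_ne cs hct,
          pvCollect_cons_ne cs tok (by rintro (h | h); exact hct h; exact hcn h),
          List.modifyHead_modifyHead]
        have hfg : ((tok ++ ·) ∘ (c :: ·)) = (((tok ++ [c]) : List Char) ++ ·) := by
          funext x; simp
        rw [hfg]
        exact ih (tok ++ [c])
          (by simp only [List.mem_append, List.mem_singleton]
              rintro (h | h); exact hn h; exact hcn h.symm)
          (by simp only [List.mem_append, List.mem_singleton]
              rintro (h | h); exact ht h; exact hct h.symm)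

-- inner loop of A: append-if is filter
theorem pvInnerFold (l acc : List String) :
    l.foldl (fun cl cy => if cy ≠ "" ∧ PySem.Str.count cy "." = 0 then cl ++ [cy] else cl) acc
      = acc ++ l.filter (fun cy => decide (cy ≠ "" ∧ PySem.Str.count cy "." = 0)) := by
  induction l generalizing acc with
  | nil => simp
  | cons x l ih =>
    rw [List.foldl_cons, List.filter_cons]
    by_cases h : x ≠ "" ∧ PySem.Str.count x "." = 0
    · rw [if_pos h, if_pos (decide_eq_true h), ih]
      simp
    · rw [if_neg h, if_neg (by simpa using h)]
      exact ih acc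

theorem pvKeepS_ofList (t : List Char) :
    decide (String.ofList t ≠ "" ∧ PySem.Str.count (String.ofList t) "." = 0) = pvKeep t := by
  have h1 : String.ofList t ≠ "" ↔ t ≠ [] := by
    constructor
    · intro h he; exact h (by simp [he])
    · intro h he; exact h (by simpa using congrArg String.toList he)
  have h2 : PySem.Str.count (String.ofList t) "." = t.count '.' := by
    rw [PySem.Str.count_eq]; simp [pvCount_single]
  simp only [pvKeep, h2]
  by_cases hk : t ≠ [] ∧ '.' ∉ t
  · rw [decide_eq_true (by exact ⟨h1.2 hk.1, List.count_eq_zero.2 hk.2⟩)]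
    simp [hk.1, hk.2]
  · rw [decide_eq_false (fun hc => hk ⟨h1.1 hc.1, List.count_eq_zero.1 hc.2⟩)]
    rcases not_and_or.1 hk with h | h
    · simp [List.isEmpty_iff.2 (not_not.1 h)]
    · simp [List.contains_eq_mem, not_not.1 h]

theorem pvInner_loop (c : List String) (acc : List String) :
    (PySem.List.pyRange 0 (c.length : Int) 1).foldl
      (fun clientes y =>
        if PySem.List.pyGetD c y "" ≠ "" ∧ PySem.Str.count (PySem.List.pyGetD c y "") "." = 0
        then clientes ++ [PySem.List.pyGetD c y ""] else clientes) acc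
    = acc ++ c.filter (fun cy => decide (cy ≠ "" ∧ PySem.Str.count cy "." = 0)) := by
  rw [PySem.List.foldl_pyRange_zero_pyGetD' c ""
    (fun clientes cy => if cy ≠ "" ∧ PySem.Str.count cy "." = 0 then clientes ++ [cy] else clientes) acc]
  exact pvInnerFold c acc

theorem pvPieces_eq (p : String) :
    ((PySem.Str.split? (PySem.Str.stripChars p "\n") "\n").getD []).filter
        (fun cy => decide (cy ≠ "" ∧ PySem.Str.count cy "." = 0))
      = ((pvSplit1 '\n' p.toList).filter pvKeep).map String.ofList := by
  have hsplitn : (PySem.Str.split? (PySem.Str.stripChars p "\n") "\n").getD []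
      = (pvSplit1 '\n' (PySem.Str.stripChars p "\n").toList).map String.ofList := by
    show (Option.map _ (PySem.Chars.split? (PySem.Str.stripChars p "\n").toList ['\n'])).getD [] = _
    simp [PySem.Chars.split?, pvSplitOn_single]
  rw [hsplitn, List.filter_map]
  have hfun : ((fun cy => decide (cy ≠ "" ∧ PySem.Str.count cy "." = 0)) ∘ String.ofList)
      = pvKeep := by
    funext t; exact pvKeepS_ofList t
  rw [hfun]
  rw [PySem.Str.toList_stripChars]
  rw [show ("\n" : String).toList = ['\n'] from rfl]
  rw [pvStrip_filter]

theorem pvOuter_loop (a : List String) :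
    (PySem.List.pyRange 0 (a.length : Int) 1).foldl
      (fun clientes x =>
        (PySem.List.pyRange 0 (((PySem.Str.split? (PySem.Str.stripChars (PySem.List.pyGetD a x "") "\n") "\n").getD []).length : Int) 1).foldl
          (fun clientes y =>
            if PySem.List.pyGetD ((PySem.Str.split? (PySem.Str.stripChars (PySem.List.pyGetD a x "") "\n") "\n").getD []) y "" ≠ "" ∧
               PySem.Str.count (PySem.List.pyGetD ((PySem.Str.split? (PySem.Str.stripChars (PySem.List.pyGetD a x "") "\n") "\n").getD []) y "") "." = 0
            then clientes ++ [PySem.List.pyGetD ((PySem.Str.split? (PySem.Str.stripChars (PySem.List.pyGetD a x "") "\n") "\n").getD []) y ""]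
            else clientes)
          clientes) []
    = a.flatMap (fun p => ((pvSplit1 '\n' p.toList).filter pvKeep).map String.ofList) := by
  rw [PySem.List.foldl_pyRange_zero_pyGetD' a ""
    (fun clientes p =>
      (PySem.List.pyRange 0 (((PySem.Str.split? (PySem.Str.stripChars p "\n") "\n").getD []).length : Int) 1).foldl
        (fun clientes y =>
          if PySem.List.pyGetD ((PySem.Str.split? (PySem.Str.stripChars p "\n") "\n").getD []) y "" ≠ "" ∧
             PySem.Str.count (PySem.List.pyGetD ((PySem.Str.split? (PySem.Str.stripChars p "\n") "\n").getD []) y "") "." = 0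
          then clientes ++ [PySem.List.pyGetD ((PySem.Str.split? (PySem.Str.stripChars p "\n") "\n").getD []) y ""]
          else clientes)
        clientes) []]
  calc a.foldl _ []
      = a.foldl (fun acc p => acc ++ ((pvSplit1 '\n' p.toList).filter pvKeep).map String.ofList) [] := by
        apply PySem.List.foldl_congr_mem a _ _ []
        intro acc p _
        rw [pvInner_loop ((PySem.Str.split? (PySem.Str.stripChars p "\n") "\n").getD []) acc]
        rw [pvPieces_eq p]
    _ = _ := by
        rw [PySem.List.foldl_append_eq_flatMap]; simp

theorem pvA_eq (ls : String) :
    convertir_string_a_lista ls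
      = ((pvSplit1 '\t' ls.toList).flatMap
          (fun p => (pvSplit1 '\n' p).filter pvKeep)).map String.ofList := by
  have hz := pvOuter_loop ((PySem.Str.split? ls "\t").getD [])
  have hsplit : (PySem.Str.split? ls "\t").getD []
      = (pvSplit1 '\t' ls.toList).map String.ofList := by
    show (Option.map _ (PySem.Chars.split? ls.toList ['\t'])).getD [] = _
    simp [PySem.Chars.split?, pvSplitOn_single]
  show (PySem.List.pyRange 0 ((((PySem.Str.split? ls "\t").getD []).length : Int)) 1).foldl _ [] = _
  rw [hz, hsplit, List.flatMap_map, List.map_flatMap]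
  apply List.flatMap_congr
  intro t _
  simp [String.toList_ofList]

theorem pvB_fold (cs : List Char) (acc : List String) (tok : List Char) :
    ((cs ++ ['\t']).foldl
      (fun (st : List String × List Char) ch =>
        if ch = '\t' ∨ ch = '\n' then
          (if st.2 ≠ [] ∧ '.' ∉ st.2 then st.1 ++ [String.ofList st.2] else st.1, ([] : List Char))
        else (st.1, st.2 ++ [ch]))
      (acc, tok)).1
    = acc ++ (pvCollect cs tok).map String.ofList := by
  induction cs generalizing acc tok with
  | nil =>
    rw [List.nil_append, List.foldl_cons, List.foldl_nil,
      if_pos (show ('\t' : Char) = '\t' ∨ ('\t' : Char) = '\n' from Or.inl rfl)]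
    rw [show pvCollect [] tok = pvFlush tok from rfl]
    unfold pvFlush
    split_ifs <;> simp
  | cons c cs ih =>
    by_cases hd : c = '\t' ∨ c = '\n'
    · simp only [List.cons_append, List.foldl_cons, if_pos hd, pvCollect, if_pos hd]
      rw [ih]
      unfold pvFlush
      split_ifs <;> simp
    · simp only [List.cons_append, List.foldl_cons, if_neg hd, pvCollect, if_neg hd]
      exact ih acc (tok ++ [c])

-- ===== VERDICT (by name: the statement is the Claim_ definition above) =====
theorem convertir_string_a_lista_spec : Claim_equal_convertir_string_a_lista := by
  intro ls _
  unfold Spec_convertir_string_a_lista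
  rw [pvA_eq]
  unfold convertir_string_a_lista_alt
  rw [pvB_fold ls.toList [] []]
  rw [← pvMain ls.toList [] (by simp) (by simp)]
  simp [pvModifyHead_id']
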